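-- pv_equiv track=rewrite | github.com/Hencya/WordPuzzleSearch | WordPuzzleSearch_bruteforce.py | diagonalRightDown
-- ===== SOURCE A (Python) =====
-- def diagonalRightDown(grid, col, row, hasilGrid):
--     concateGrid = grid[col][row]
--     hasilGrid["arrayHasil"].append(concateGrid)
--     hasilGrid["posisi"].append(f"{col},{row}")
--     hasilGrid["jenis"].append("Diagonal Right Down")
--     row += 1
--     col += 1
--     while row <= (len(grid)-1) and col <= (len(grid[0])-1):
--         concateGrid = concateGrid + grid[col][row]
--         hasilGrid["arrayHasil"].append(concateGrid)
--         hasilGrid["posisi"].append(f"{col},{row}")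
--         hasilGrid["jenis"].append("Diagonal Right Down")
--         row += 1
--         col += 1
--     return hasilGrid
-- ===== SOURCE B (Python) =====
-- def _collectDiag(grid, c, r):
--     # recursively gather the diagonal cells starting at (c, r); raises like A on a bad start
--     cell = grid[c][r]
--     if r + 1 <= len(grid) - 1 and c + 1 <= len(grid[0]) - 1:
--         return [cell] + _collectDiag(grid, c + 1, r + 1)
--     return [cell]
--
-- def diagonalRightDown(grid, col, row, hasilGrid):
--     # stage 1: recursive traversal; stage 2: join once, recover each prefix by slicing the joined word
--     cells = _collectDiag(grid, col, row)
--     word = "".join(cells)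
--     c, r, off = col, row, 0
--     for cell in cells:
--         off += len(cell)
--         hasilGrid["arrayHasil"].append(word[:off])
--         hasilGrid["posisi"].append(f"{c},{r}")
--         hasilGrid["jenis"].append("Diagonal Right Down")
--         c += 1
--         r += 1
--     return hasilGrid
-- ===== Notes on version B (the rewrite author's own statement) =====
-- stated objective: alternative
-- what changed: A interleaves one while-loop that grows the prefix string and appends three entries per step; B stages the work: a recursive helper collects the diagonal cells, the whole diagonal word is joined once, and each emitted prefix is recovered by slicing that word at a running offset.
import Mathlib
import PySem

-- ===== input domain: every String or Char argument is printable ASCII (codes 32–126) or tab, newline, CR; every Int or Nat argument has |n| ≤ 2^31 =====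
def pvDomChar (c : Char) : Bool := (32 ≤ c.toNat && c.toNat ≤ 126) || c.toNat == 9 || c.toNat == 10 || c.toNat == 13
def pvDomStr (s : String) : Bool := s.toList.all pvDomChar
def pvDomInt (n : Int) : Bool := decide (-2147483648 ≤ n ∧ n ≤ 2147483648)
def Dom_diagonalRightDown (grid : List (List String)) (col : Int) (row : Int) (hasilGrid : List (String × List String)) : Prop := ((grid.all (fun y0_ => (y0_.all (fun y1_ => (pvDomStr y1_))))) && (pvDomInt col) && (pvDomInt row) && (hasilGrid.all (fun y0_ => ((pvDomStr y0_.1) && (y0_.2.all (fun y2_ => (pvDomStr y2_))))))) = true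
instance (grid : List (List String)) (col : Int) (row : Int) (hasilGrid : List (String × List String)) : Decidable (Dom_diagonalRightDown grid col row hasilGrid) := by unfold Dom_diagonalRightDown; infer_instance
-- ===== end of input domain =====

-- B replaces A's single interleaved while-loop (which grows the prefix string step by step) by a
-- staged decomposition: a recursive helper first collects the diagonal cells, the whole diagonal
-- word is joined once, and each emitted prefix is recovered by slicing that word at the running
-- offset; same in-place mutation of the three lists of hasilGrid as A (return value AND side
-- effects coincide).

-- shared rendering of the f-string f"{c},{r}" both Pythons contain verbatim
def pvFmtPos (c r : Int) : String := PySem.Int.toStr c ++ "," ++ PySem.Int.toStr r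

-- ===== PORT A =====
-- the 'while row <= len(grid)-1 and col <= len(grid[0])-1' loop (n = len(grid), m = len(grid[0]))
def diagonalRightDownLoop (grid : List (List String)) (n m : Int) (col row : Int)
    (concate : String) (d : PySem.Dict String (List String)) : PySem.Dict String (List String) :=
  if _h : row ≤ n - 1 ∧ col ≤ m - 1 then
    diagonalRightDownLoop grid n m (col + 1) (row + 1)
      (concate ++ PySem.List.pyGetD (PySem.List.pyGetD grid col []) row "")
      ((((d.modify "arrayHasil" [] (· ++ [concate ++ PySem.List.pyGetD (PySem.List.pyGetD grid col []) row ""])).modify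
          "posisi" [] (· ++ [pvFmtPos col row])).modify
          "jenis" [] (· ++ ["Diagonal Right Down"])))
  else d
termination_by (n - row).toNat
decreasing_by omega

def diagonalRightDown (grid : List (List String)) (col : Int) (row : Int) (hasilGrid : List (String × List String)) : List (String × List String) :=
  let concateGrid := PySem.List.pyGetD (PySem.List.pyGetD grid col []) row ""
  let d := PySem.Dict.mk hasilGrid
  let d := d.modify "arrayHasil" [] (· ++ [concateGrid])
  let d := d.modify "posisi" [] (· ++ [pvFmtPos col row])
  let d := d.modify "jenis" [] (· ++ ["Diagonal Right Down"])
  (diagonalRightDownLoop grid (grid.length : Int) ((PySem.List.pyGetD grid 0 []).length : Int)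
    (col + 1) (row + 1) concateGrid d).items

-- ===== PORT B =====
-- _collectDiag: recursive gathering of the diagonal cells (n = len(grid), m = len(grid[0]))
def collectDiag (grid : List (List String)) (n m : Int) (c r : Int) : List String :=
  let cell := PySem.List.pyGetD (PySem.List.pyGetD grid c []) r ""
  if _h : r + 1 ≤ n - 1 ∧ c + 1 ≤ m - 1 then
    cell :: collectDiag grid n m (c + 1) (r + 1)
  else [cell]
termination_by (n - r).toNat
decreasing_by omega

def diagonalRightDown_alt (grid : List (List String)) (col : Int) (row : Int) (hasilGrid : List (String × List String)) : List (String × List String) :=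
  let cells := collectDiag grid (grid.length : Int) ((PySem.List.pyGetD grid 0 []).length : Int) col row
  let word := PySem.Str.join "" cells
  (cells.foldl
    (fun (p : Int × Int × Int × PySem.Dict String (List String)) cell =>
      let off := p.2.2.1 + PySem.Str.len cell
      (p.1 + 1, p.2.1 + 1, off,
        (((p.2.2.2.modify "arrayHasil" [] (· ++ [PySem.Str.slice word none (some off)])).modify
            "posisi" [] (· ++ [pvFmtPos p.1 p.2.1])).modify
            "jenis" [] (· ++ ["Diagonal Right Down"]))))
    (col, row, 0, PySem.Dict.mk hasilGrid)).2.2.2.items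

-- ===== PRECONDITION & SPEC =====
-- Pre_ excludes exactly the inputs on which A raises (a KeyError when one of the three keys is
-- missing, an IndexError when some visited cell grid[col+k][row+k] is out of range), plus
-- association lists with duplicate keys, which do not represent any Python dict (a dict has
-- unique keys), so no input A accepts is lost.
def Pre_diagonalRightDown (grid : List (List String)) (col : Int) (row : Int) (hasilGrid : List (String × List String)) : Prop :=
  (hasilGrid.map Prod.fst).Nodup ∧
  "arrayHasil" ∈ hasilGrid.map Prod.fst ∧
  "posisi" ∈ hasilGrid.map Prod.fst ∧
  "jenis" ∈ hasilGrid.map Prod.fst ∧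
  ∀ k ∈ List.range (1 + max 0 (min ((grid.length : Int) - row) (((grid.headD []).length : Int) - col) - 1)).toNat,
    ((PySem.List.pyGet? grid (col + k)).bind (fun r => PySem.List.pyGet? r (row + k))).isSome
instance (grid : List (List String)) (col : Int) (row : Int) (hasilGrid : List (String × List String)) : Decidable (Pre_diagonalRightDown grid col row hasilGrid) := by unfold Pre_diagonalRightDown; infer_instance

def pvWitness_diagonalRightDown : List (List String) × Int × Int × (List (String × List String)) :=
  ([["a", "b"], ["c", "d"]], 0, 0, [("arrayHasil", []), ("posisi", []), ("jenis", [])])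

def Spec_diagonalRightDown (grid : List (List String)) (col : Int) (row : Int) (hasilGrid : List (String × List String)) (out : List (String × List String)) : Prop := out = diagonalRightDown_alt grid col row hasilGrid
instance (grid : List (List String)) (col : Int) (row : Int) (hasilGrid : List (String × List String)) (out : List (String × List String)) : Decidable (Spec_diagonalRightDown grid col row hasilGrid out) := by unfold Spec_diagonalRightDown; infer_instance

-- ===== CLAIM (what is proved, stated in full; the proofs are below) =====
def Claim_equal_diagonalRightDown : Prop := ∀ (grid : List (List String)) (col : Int) (row : Int) (hasilGrid : List (String × List String)), Dom_diagonalRightDown grid col row hasilGrid → Pre_diagonalRightDown grid col row hasilGrid → Spec_diagonalRightDown grid col row hasilGrid (diagonalRightDown grid col row hasilGrid)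

-- ===== LEMMAS AND PROOFS =====

-- the per-step effect on the dict both programs perform: append prefix / position / kind
def pvEmit (d : PySem.Dict String (List String)) (e : String × String) : PySem.Dict String (List String) :=
  ((d.modify "arrayHasil" [] (· ++ [e.1])).modify "posisi" [] (· ++ [e.2])).modify "jenis" [] (· ++ ["Diagonal Right Down"])

-- the (prefix, position) pairs emitted along the diagonal, t steps starting at (col,row) with accumulated prefix c
def pvEmissions (grid : List (List String)) (c : String) (col row : Int) : Nat → List (String × String)
  | 0 => []
  | t + 1 =>
    (c ++ PySem.List.pyGetD (PySem.List.pyGetD grid col []) row "", pvFmtPos col row) ::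
      pvEmissions grid (c ++ PySem.List.pyGetD (PySem.List.pyGetD grid col []) row "") (col + 1) (row + 1) t

lemma pv_loop_eq (grid : List (List String)) (n m : Int) (t : Nat) :
    ∀ (col row : Int) (c : String) (d : PySem.Dict String (List String)),
    t = (min (n - row) (m - col)).toNat →
    diagonalRightDownLoop grid n m col row c d = (pvEmissions grid c col row t).foldl pvEmit d := by
  induction t with
  | zero =>
    intro col row c d ht
    rw [diagonalRightDownLoop]
    rw [dif_neg (by omega)]
    rfl
  | succ t ih =>
    intro col row c d ht
    rw [diagonalRightDownLoop]
    rw [dif_pos (by omega)]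
    rw [ih (col + 1) (row + 1) _ _ (by omega)]
    rfl

-- slicing a string at its own length returns the string
lemma pv_slice_self (u : String) :
    PySem.Str.slice u none (some (PySem.Str.len u)) = u := by
  apply String.toList_inj.mp
  rw [PySem.Str.toList_slice, PySem.Chars.slice_eq_listSlice, PySem.Str.len_eq,
      PySem.List.slice_to _ (by positivity), Int.toNat_natCast]
  exact List.take_length

-- slicing the concatenation at the length of its left part returns the left part
lemma pv_slice_left (u v : String) :
    PySem.Str.slice (u ++ v) none (some (PySem.Str.len u)) = u := by
  apply String.toList_inj.mp
  rw [PySem.Str.toList_slice, PySem.Chars.slice_eq_listSlice, PySem.Str.len_eq,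
      PySem.List.slice_to _ (by positivity), Int.toNat_natCast, String.toList_append]
  exact List.take_left

-- "".join over a cons is plain concatenation
lemma pv_join_cons (x : String) (xs : List String) :
    PySem.Str.join "" (x :: xs) = x ++ PySem.Str.join "" xs := by
  apply String.toList_inj.mp
  rw [String.toList_append, PySem.Str.toList_join, PySem.Str.toList_join]
  cases xs with
  | nil => simp [PySem.Chars.join_singleton, PySem.Chars.join_nil]
  | cons y ys =>
    rw [List.map_cons, List.map_cons, PySem.Chars.join_cons_cons]
    simp

-- B's staged fold (offset + slicing) performs exactly the pvEmissions sequence of dict updates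
lemma pv_fold_eq (grid : List (List String)) (n m : Int) (word : String) (t : Nat) :
    ∀ (c r : Int) (pre : String) (o : Int) (d : PySem.Dict String (List String)),
    t = (min (n - (r + 1)) (m - (c + 1))).toNat →
    o = PySem.Str.len pre →
    word = pre ++ PySem.Str.join "" (collectDiag grid n m c r) →
    ((collectDiag grid n m c r).foldl
      (fun (p : Int × Int × Int × PySem.Dict String (List String)) cell =>
        let off := p.2.2.1 + PySem.Str.len cell
        (p.1 + 1, p.2.1 + 1, off,
          (((p.2.2.2.modify "arrayHasil" [] (· ++ [PySem.Str.slice word none (some off)])).modify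
              "posisi" [] (· ++ [pvFmtPos p.1 p.2.1])).modify
              "jenis" [] (· ++ ["Diagonal Right Down"]))))
      (c, r, o, d)).2.2.2
    = (pvEmissions grid pre c r (t + 1)).foldl pvEmit d := by
  induction t with
  | zero =>
    intro c r pre o d ht ho hw
    rw [collectDiag] at hw ⊢
    rw [dif_neg (by omega)] at hw ⊢
    rw [pv_join_cons] at hw
    have hword : word = (pre ++ PySem.List.pyGetD (PySem.List.pyGetD grid c []) r "") := by
      apply String.toList_inj.mp
      rw [hw]
      simp [PySem.Str.toList_join, PySem.Chars.join_nil, String.toList_append]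
    simp only [List.foldl_cons, List.foldl_nil, pvEmissions, pvEmit]
    have hoff : o + PySem.Str.len (PySem.List.pyGetD (PySem.List.pyGetD grid c []) r "")
        = PySem.Str.len (pre ++ PySem.List.pyGetD (PySem.List.pyGetD grid c []) r "") := by
      rw [PySem.Str.len_append, ho]
    rw [hoff]
    have hsl : PySem.Str.slice word none
        (some (PySem.Str.len (pre ++ PySem.List.pyGetD (PySem.List.pyGetD grid c []) r "")))
        = pre ++ PySem.List.pyGetD (PySem.List.pyGetD grid c []) r "" := by
      conv_lhs => rw [hword]
      exact pv_slice_self _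
    rw [hsl]
  | succ t ih =>
    intro c r pre o d ht ho hw
    rw [collectDiag] at hw ⊢
    rw [dif_pos (by omega)] at hw ⊢
    rw [pv_join_cons] at hw
    simp only [List.foldl_cons]
    set g := PySem.List.pyGetD (PySem.List.pyGetD grid c []) r "" with hg
    have hoff : o + PySem.Str.len g = PySem.Str.len (pre ++ g) := by
      rw [PySem.Str.len_append, ho]
    have hword' : word = (pre ++ g) ++ PySem.Str.join "" (collectDiag grid n m (c + 1) (r + 1)) := by
      rw [hw, String.append_assoc]
    have hsl : PySem.Str.slice word none (some (PySem.Str.len (pre ++ g))) = pre ++ g := by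
      conv_lhs => rw [hword']
      exact pv_slice_left _ _
    simp only [hoff, hsl]
    rw [ih (c + 1) (r + 1) (pre ++ g) _ _ (by omega) rfl hword']
    have hE : pvEmissions grid pre c r (t + 1 + 1)
        = (pre ++ g, pvFmtPos c r) :: pvEmissions grid (pre ++ g) (c + 1) (r + 1) (t + 1) := rfl
    rw [hE, List.foldl_cons]
    rfl

lemma pv_main (grid : List (List String)) (col row : Int) (hasil : List (String × List String)) :
    diagonalRightDown grid col row hasil = diagonalRightDown_alt grid col row hasil := by
  set n : Int := (grid.length : Int) with hn
  set m : Int := ((PySem.List.pyGetD grid 0 []).length : Int) with hm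
  set t0 : Nat := (min (n - (row + 1)) (m - (col + 1))).toNat with ht0
  set g : String := PySem.List.pyGetD (PySem.List.pyGetD grid col []) row "" with hg
  have hAeq : diagonalRightDown grid col row hasil
      = ((pvEmissions grid "" col row (t0 + 1)).foldl pvEmit (PySem.Dict.mk hasil)).items := by
    show (diagonalRightDownLoop grid n m (col + 1) (row + 1) g
        (pvEmit (PySem.Dict.mk hasil) (g, pvFmtPos col row))).items = _
    rw [pv_loop_eq grid n m t0 (col + 1) (row + 1) g _ (by omega)]
    have hE : pvEmissions grid "" col row (t0 + 1)
        = ("" ++ g, pvFmtPos col row) :: pvEmissions grid ("" ++ g) (col + 1) (row + 1) t0 := rfl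
    rw [hE, List.foldl_cons]
    simp [String.empty_append]
  have hBeq : diagonalRightDown_alt grid col row hasil
      = ((pvEmissions grid "" col row (t0 + 1)).foldl pvEmit (PySem.Dict.mk hasil)).items := by
    show ((collectDiag grid n m col row).foldl _ (col, row, (0 : Int), PySem.Dict.mk hasil)).2.2.2.items = _
    rw [pv_fold_eq grid n m (PySem.Str.join "" (collectDiag grid n m col row)) t0 col row ""
        0 (PySem.Dict.mk hasil) (by omega) rfl (String.empty_append).symm]
  rw [hAeq, hBeq]

-- ===== VERDICT (by name: the statement is the Claim_ definition above) =====
theorem diagonalRightDown_spec : Claim_equal_diagonalRightDown := by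
  intro grid col row hasil _hdom _hpre
  exact pv_main grid col row hasil
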